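-- pv_equiv track=rewrite | github.com/bnjlkaNjlowka/cool | python/23.py | delt_num
-- ===== SOURCE A (Python) =====
-- import itertools
--
-- def delt_num(Pdelt):
--     aye=[]
--     for i in range(1,len(Pdelt)+1):
--         aye.append(list(itertools.combinations(Pdelt,i)))
--     delt=[]
--     for spisok1 in range(len(aye)):
--         for spisok2 in range(len(aye[spisok1])):
--             temp_num=1
--             for spisok3 in range(len(aye[spisok1][spisok2])):
--                 temp_num=temp_num*aye[spisok1][spisok2][spisok3]
--                 delt.append(temp_num)
--     i=0
--     delt2=[]
--     delt.sort()
--     while i!=len(delt):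
--         if delt.count(delt[i])!=1:
--             delt2.append(delt[i])
--             i=i+delt.count(delt[i])
--         else:
--             delt2.append(delt[i])
--             i=i+1
--     return delt2
-- ===== SOURCE B (Python) =====
-- def delt_num(Pdelt):
--     # Incremental subset-product DP: after processing a prefix, prods holds
--     # exactly the products of all non-empty subsequences of that prefix.
--     prods = set()
--     for x in Pdelt:
--         prods = prods | {p * x for p in prods} | {x}
--     return sorted(prods)
-- ===== Notes on version B (the rewrite author's own statement) =====
-- stated objective: faster
-- what changed: A enumerates every combination of every size (n*2^n work), collects every prefix product, sorts the whole multiset and dedups with a quadratic count-based while loop; B builds the set of distinct non-empty-subset products incrementally (prods = prods | prods*x | {x}) and sorts the distinct values once.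
import Mathlib
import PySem

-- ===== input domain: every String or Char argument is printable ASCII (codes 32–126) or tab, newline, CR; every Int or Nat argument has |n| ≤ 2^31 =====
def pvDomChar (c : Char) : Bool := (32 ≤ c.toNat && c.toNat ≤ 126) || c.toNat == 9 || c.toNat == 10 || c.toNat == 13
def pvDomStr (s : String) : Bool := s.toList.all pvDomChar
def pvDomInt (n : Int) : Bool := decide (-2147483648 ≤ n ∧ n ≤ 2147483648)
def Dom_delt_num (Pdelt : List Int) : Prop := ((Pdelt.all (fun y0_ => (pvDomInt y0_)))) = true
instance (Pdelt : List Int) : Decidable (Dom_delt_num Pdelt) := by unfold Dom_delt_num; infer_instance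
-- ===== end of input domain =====

-- B replaces A's size-by-size combination enumeration + sort-everything + count-based dedup scan
-- by an incremental set of distinct subset products, sorted once (faster).

-- ===== PORT A =====
-- A's final while loop: walk the sorted list with index i and accumulator delt2,
-- append delt[i] once and jump over all of its occurrences (i += count).
-- Terminates since count ≥ 1 at an in-range index.
def pvDedupLoop (l : List Int) (i : Nat) (delt2 : List Int) : List Int :=
  if h : i < l.length then
    if l.count l[i] ≠ 1 then pvDedupLoop l (i + l.count l[i]) (delt2 ++ [l[i]])
    else pvDedupLoop l (i + 1) (delt2 ++ [l[i]])
  else delt2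
termination_by l.length - i
decreasing_by
  · have hv : 0 < l.count l[i] := List.count_pos_iff.mpr (List.getElem_mem h)
    omega
  · omega

-- itertools.combinations(Pdelt, i) is a standard-library call, ported as List.sublistsLen
-- (the same combinations; only their enumeration order differs, which the sorted and
-- deduplicated final result does not depend on).
def delt_num (Pdelt : List Int) : List Int :=
  let aye : List (List (List Int)) :=
    (PySem.List.pyRange 1 ((Pdelt.length : Int) + 1) 1).foldl
      (fun acc i => acc ++ [List.sublistsLen i.toNat Pdelt]) []
  -- delt.append(temp_num) is encoded by consing onto the accumulator and reversing
  -- once at the end (the same list, built in O(1) per append as in Python)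
  let delt : List Int :=
    (aye.foldl (fun d grp =>
      grp.foldl (fun d combo =>
        (combo.foldl (fun (st : Int × List Int) x => (st.1 * x, (st.1 * x) :: st.2))
          ((1 : Int), d)).2) d) []).reverse
  -- delt.sort(): ported as the library merge sort (stable, same sorted list of Ints;
  -- PySem's insertion 'sorted' overflows the stack on this n·2^n-sized list)
  pvDedupLoop (delt.mergeSort (fun a b => decide (a ≤ b))) 0 []

-- ===== PORT B =====
def delt_num_alt (Pdelt : List Int) : List Int :=
  let prods : PySem.Set Int :=
    Pdelt.foldl (fun s x =>
      PySem.Set.union (PySem.Set.union s (s.map (fun p => p * x))) [x]) PySem.Set.empty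
  PySem.List.sorted prods (fun v => v) false

-- ===== PRECONDITION & SPEC =====
def Spec_delt_num (Pdelt : List Int) (out : List Int) : Prop := out = delt_num_alt Pdelt
instance (Pdelt : List Int) (out : List Int) : Decidable (Spec_delt_num Pdelt out) := by unfold Spec_delt_num; infer_instance

-- ===== CLAIM (what is proved, stated in full; the proofs are below) =====
def Claim_equal_delt_num : Prop := ∀ (Pdelt : List Int), Dom_delt_num Pdelt → Spec_delt_num Pdelt (delt_num Pdelt)

-- ===== LEMMAS AND PROOFS =====

-- prefix products of a combination, seeded with t
def pvPP (t : Int) : List Int → List Int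
  | [] => []
  | x :: s => (t * x) :: pvPP (t * x) s

theorem pvPP_foldl (combo : List Int) : ∀ (t : Int) (d : List Int),
    (combo.foldl (fun (st : Int × List Int) x => (st.1 * x, (st.1 * x) :: st.2)) (t, d)).2
      = (pvPP t combo).reverse ++ d := by
  induction combo with
  | nil => intro t d; simp [pvPP]
  | cons x s ih => intro t d; simp [pvPP, ih]

theorem mem_pvPP (combo : List Int) : ∀ (t v : Int),
    v ∈ pvPP t combo ↔ ∃ p, p <+: combo ∧ p ≠ [] ∧ v = t * p.prod := by
  induction combo with
  | nil =>
      intro t v; simp only [pvPP, List.not_mem_nil, false_iff]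
      rintro ⟨p, hp, hne, -⟩
      exact hne (List.prefix_nil.mp hp)
  | cons x s ih =>
      intro t v
      simp only [pvPP, List.mem_cons, ih]
      constructor
      · rintro (rfl | ⟨q, hq, hqne, rfl⟩)
        · exact ⟨[x], ⟨s, rfl⟩, by simp, by simp⟩
        · exact ⟨x :: q, (List.cons_prefix_cons).mpr ⟨rfl, hq⟩, by simp,
            by simp [List.prod_cons, mul_assoc]⟩
      · rintro ⟨p, hp, hpne, rfl⟩
        match p, hpne with
        | y :: q, _ =>
          obtain ⟨rfl, hq⟩ := (List.cons_prefix_cons).mp hp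
          cases q with
          | nil => exact Or.inl (by simp)
          | cons a b =>
              exact Or.inr ⟨a :: b, hq, by simp, by simp [List.prod_cons, mul_assoc]⟩

theorem pvInnerFold (grp : List (List Int)) : ∀ (d : List Int),
    grp.foldl (fun d combo =>
        (combo.foldl (fun (st : Int × List Int) x => (st.1 * x, (st.1 * x) :: st.2))
          ((1 : Int), d)).2) d
      = (grp.flatMap (pvPP 1)).reverse ++ d := by
  induction grp with
  | nil => intro d; simp
  | cons c grp ih =>
      intro d
      rw [List.foldl_cons, pvPP_foldl, ih, List.flatMap_cons, List.reverse_append,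
        List.append_assoc]

theorem pvOuterFold (aye : List (List (List Int))) : ∀ (d : List Int),
    aye.foldl (fun d grp =>
      grp.foldl (fun d combo =>
        (combo.foldl (fun (st : Int × List Int) x => (st.1 * x, (st.1 * x) :: st.2))
          ((1 : Int), d)).2) d) d
      = (aye.flatMap (fun grp => grp.flatMap (pvPP 1))).reverse ++ d := by
  induction aye with
  | nil => intro d; simp
  | cons g aye ih =>
      intro d
      rw [List.foldl_cons, pvInnerFold, ih, List.flatMap_cons, List.reverse_append,
        List.append_assoc]

-- membership in A's raw delt list = products of non-empty sublists
theorem pvMemA (Pdelt : List Int) (v : Int) :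
    (v ∈ (((PySem.List.pyRange 1 ((Pdelt.length : Int) + 1) 1).foldl
        (fun acc i => acc ++ [List.sublistsLen i.toNat Pdelt]) []).foldl
          (fun d grp =>
            grp.foldl (fun d combo =>
              (combo.foldl (fun (st : Int × List Int) x => (st.1 * x, (st.1 * x) :: st.2))
                ((1 : Int), d)).2) d) []).reverse)
      ↔ ∃ s, s.Sublist Pdelt ∧ s ≠ [] ∧ v = s.prod := by
  rw [List.mem_reverse, PySem.List.foldl_append_singleton_eq_map, pvOuterFold,
    List.append_nil, List.mem_reverse]
  simp only [List.nil_append, List.mem_flatMap, List.mem_map]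
  constructor
  · rintro ⟨grp, ⟨i, hi, rfl⟩, combo, hc, hv⟩
    rw [mem_pvPP] at hv
    obtain ⟨p, hp, hpne, rfl⟩ := hv
    obtain ⟨hsub, -⟩ := List.mem_sublistsLen.mp hc
    exact ⟨p, (hp.sublist).trans hsub, hpne, by simp⟩
  · rintro ⟨s, hsub, hne, rfl⟩
    have h1 : 1 ≤ s.length := by
      cases s with | nil => exact absurd rfl hne | cons a b => simp
    refine ⟨List.sublistsLen s.length Pdelt, ⟨(s.length : Int), ?_, by simp⟩, s,
      List.mem_sublistsLen.mpr ⟨hsub, rfl⟩, ?_⟩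
    · rw [PySem.List.mem_pyRange_one]
      have := hsub.length_le
      omega
    · rw [mem_pvPP]
      exact ⟨s, List.prefix_refl s, hne, by simp⟩

-- membership in B's product set
theorem pvMemBFold (xs : List Int) : ∀ (S : List Int) (v : Int),
    (v ∈ xs.foldl (fun s x =>
        PySem.Set.union (PySem.Set.union s (s.map (fun p => p * x))) [x]) S)
      ↔ v ∈ S ∨ ∃ s, s.Sublist xs ∧ s ≠ [] ∧ (v = s.prod ∨ ∃ p ∈ S, v = p * s.prod) := by
  induction xs with
  | nil =>
      intro S v
      simp only [List.foldl_nil, List.sublist_nil]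
      constructor
      · exact Or.inl
      · rintro (h | ⟨s, rfl, hne, -⟩); · exact h
        exact absurd rfl hne
  | cons x xs ih =>
      intro S v
      rw [List.foldl_cons, ih]
      have hS' : ∀ w : Int,
          (w ∈ PySem.Set.union (PySem.Set.union S (S.map (fun p => p * x))) [x])
            ↔ w ∈ S ∨ (∃ p ∈ S, w = p * x) ∨ w = x := by
        intro w
        simp only [PySem.Set.mem_union, List.mem_map, List.mem_singleton, or_assoc]
        constructor
        · rintro (h | ⟨p, hp, heq⟩ | h)
          · exact Or.inl h
          · exact Or.inr (Or.inl ⟨p, hp, heq.symm⟩)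
          · exact Or.inr (Or.inr h)
        · rintro (h | ⟨p, hp, heq⟩ | h)
          · exact Or.inl h
          · exact Or.inr (Or.inl ⟨p, hp, heq.symm⟩)
          · exact Or.inr (Or.inr h)
      constructor
      · rintro (hw | ⟨s, hs, hne, hv⟩)
        · rcases (hS' v).mp hw with h | ⟨p, hp, heq⟩ | heq
          · exact Or.inl h
          · exact Or.inr ⟨[x], by simp, by simp, Or.inr ⟨p, hp, by simpa using heq⟩⟩
          · exact Or.inr ⟨[x], by simp, by simp, Or.inl (by simpa using heq)⟩
        · rcases hv with heq | ⟨p, hp, heq⟩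
          · exact Or.inr ⟨s, hs.cons x, hne, Or.inl heq⟩
          · rcases (hS' p).mp hp with h | ⟨q, hq, heq2⟩ | heq2
            · exact Or.inr ⟨s, hs.cons x, hne, Or.inr ⟨p, h, heq⟩⟩
            · refine Or.inr ⟨x :: s, hs.cons₂ x, by simp,
                Or.inr ⟨q, hq, ?_⟩⟩
              rw [heq, heq2, List.prod_cons]; ring
            · refine Or.inr ⟨x :: s, hs.cons₂ x, by simp, Or.inl ?_⟩
              rw [heq, heq2, List.prod_cons]
      · rintro (hw | ⟨s, hs, hne, hv⟩)
        · exact Or.inl ((hS' v).mpr (Or.inl hw))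
        · rcases List.sublist_cons_iff.mp hs with hs' | ⟨r, rfl, hr⟩
          · refine Or.inr ⟨s, hs', hne, ?_⟩
            rcases hv with h | ⟨p, hp, h⟩
            · exact Or.inl h
            · exact Or.inr ⟨p, (hS' p).mpr (Or.inl hp), h⟩
          · cases r with
            | nil =>
                rcases hv with heq | ⟨p, hp, heq⟩
                · exact Or.inl ((hS' v).mpr (Or.inr (Or.inr (by simpa using heq))))
                · exact Or.inl ((hS' v).mpr (Or.inr (Or.inl ⟨p, hp, by simpa using heq⟩)))
            | cons a b =>
                rcases hv with heq | ⟨p, hp, heq⟩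
                · refine Or.inr ⟨a :: b, hr, by simp,
                    Or.inr ⟨x, (hS' x).mpr (Or.inr (Or.inr rfl)), ?_⟩⟩
                  rw [heq, List.prod_cons]
                · refine Or.inr ⟨a :: b, hr, by simp,
                    Or.inr ⟨p * x, (hS' (p * x)).mpr (Or.inr (Or.inl ⟨p, hp, rfl⟩)), ?_⟩⟩
                  rw [heq, List.prod_cons]; ring

theorem pvNodupBFold (xs : List Int) : ∀ (S : List Int), S.Nodup →
    (xs.foldl (fun s x =>
        PySem.Set.union (PySem.Set.union s (s.map (fun p => p * x))) [x]) S).Nodup := by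
  induction xs with
  | nil => intro S h; simpa using h
  | cons x xs ih =>
      intro S h
      exact ih _ (PySem.Set.nodup_union _ _ (PySem.Set.nodup_union _ _ h))

-- the leading run of the minimum in a sorted list
theorem pvRunSplit : ∀ (t : List Int) (v : Int), t.Pairwise (· ≤ ·) → (∀ y ∈ t, v ≤ y) →
    t = List.replicate (t.count v) v ++ t.dropWhile (fun y => y == v)
      ∧ ∀ y ∈ t.dropWhile (fun y => y == v), v < y := by
  intro t
  induction t with
  | nil => intro v _ _; simp
  | cons y t ih =>
      intro v hp hv
      have hyt : ∀ z ∈ t, y ≤ z := (List.pairwise_cons.mp hp).1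
      have hpt : t.Pairwise (· ≤ ·) := (List.pairwise_cons.mp hp).2
      by_cases hy : y = v
      · subst hy
        obtain ⟨h1, h2⟩ := ih y hpt hyt
        constructor
        · rw [List.count_cons_self]
          simp only [List.dropWhile_cons, BEq.rfl]
          rw [List.replicate_succ, List.cons_append]
          exact congrArg (y :: ·) h1
        · simpa using h2
      · have hvy : v < y := lt_of_le_of_ne (hv y (by simp)) (fun h => hy h.symm)
        have hall : ∀ z ∈ y :: t, v < z := by
          intro z hz
          rcases List.mem_cons.mp hz with rfl | hz'
          · exact hvy
          · exact lt_of_lt_of_le hvy (hyt _ hz')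
        have hc : (y :: t).count v = 0 :=
          List.count_eq_zero.mpr (fun hmem => lt_irrefl v (hall v hmem))
        have hdw : (y :: t).dropWhile (fun z => z == v) = y :: t := by
          rw [List.dropWhile_cons_of_neg]
          simp [hy]
        rw [hc, hdw]
        exact ⟨by simp, hall⟩

-- inside a sorted l, the occurrences of l[i] (none of which lie before i) are
-- exactly the count-many positions starting at i
theorem pvRunAt (l : List Int) (i : Nat) (hs : l.Pairwise (· ≤ ·)) (h : i < l.length)
    (hnb : l[i] ∉ l.take i) :
    l.drop i = List.replicate (l.count l[i]) l[i] ++ l.drop (i + l.count l[i])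
      ∧ ∀ y ∈ l.drop (i + l.count l[i]), l[i] < y := by
  set v := l[i] with hvdef
  have hdrop : l.drop i = v :: l.drop (i + 1) := List.drop_eq_getElem_cons h
  have hpd : (l.drop i).Pairwise (· ≤ ·) := hs.sublist (List.drop_sublist i l)
  have hvle : ∀ y ∈ l.drop i, v ≤ y := by
    intro y hy
    rw [hdrop] at hy hpd
    rcases List.mem_cons.mp hy with rfl | hy'
    · exact le_refl v
    · exact (List.pairwise_cons.mp hpd).1 y hy'
  have hcnt : l.count v = (l.drop i).count v := by
    conv_lhs => rw [← List.take_append_drop i l]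
    rw [List.count_append, List.count_eq_zero.mpr hnb, Nat.zero_add]
  obtain ⟨h1, h2⟩ := pvRunSplit (l.drop i) v hpd hvle
  have hdd : l.drop (i + l.count v) = (l.drop i).drop (l.count v) := by
    rw [List.drop_drop, Nat.add_comm]
  have h3 : (l.drop i).drop (l.count v) = (l.drop i).dropWhile (fun y => y == v) := by
    conv_lhs => rw [h1]
    exact List.drop_left' (by simp [hcnt])
  constructor
  · rw [hdd, h3, hcnt]; exact h1
  · rw [hdd, h3]; exact h2

theorem pvDedupLoopSpec (l : List Int) (hs : l.Pairwise (· ≤ ·)) :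
    ∀ (n i : Nat), l.length - i ≤ n → (l.length ≤ i ∨ ∃ h : i < l.length, l[i] ∉ l.take i) →
      ∀ (acc : List Int), ∃ r, pvDedupLoop l i acc = acc ++ r ∧
        r.Pairwise (· < ·) ∧ ∀ v, (v ∈ r ↔ v ∈ l.drop i) := by
  intro n
  induction n with
  | zero =>
      intro i hn _ acc
      refine ⟨[], ?_, by simp, ?_⟩
      · rw [pvDedupLoop, dif_neg (by omega)]
        simp
      · have hdn : l.drop i = [] := List.drop_eq_nil_of_le (by omega)
        simp [hdn]
  | succ n ih =>
      intro i hn hinv acc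
      by_cases h : i < l.length
      · rcases hinv with h' | ⟨hlt, hnb⟩
        · omega
        have hc1 : 1 ≤ l.count l[i] := List.count_pos_iff.mpr (List.getElem_mem h)
        obtain ⟨hrun, hgt⟩ := pvRunAt l i hs h hnb
        have hunf : ∀ a, pvDedupLoop l i a = pvDedupLoop l (i + l.count l[i]) (a ++ [l[i]]) := by
          intro a
          rw [pvDedupLoop, dif_pos h]
          by_cases h1 : l.count l[i] ≠ 1
          · rw [if_pos h1]
          · rw [if_neg h1, not_not.mp h1]
        have hic : l.count l[i] ≤ l.length - i := by
          have h2 := congrArg List.length hrun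
          rw [List.length_drop, List.length_append, List.length_replicate,
            List.length_drop] at h2
          omega
        have hinv' : l.length ≤ i + l.count l[i] ∨
            ∃ h' : i + l.count l[i] < l.length,
              l[i + l.count l[i]] ∉ l.take (i + l.count l[i]) := by
          by_cases h' : i + l.count l[i] < l.length
          · refine Or.inr ⟨h', ?_⟩
            have hmem : l[i + l.count l[i]] ∈ l.drop (i + l.count l[i]) := by
              rw [List.drop_eq_getElem_cons h']
              exact List.mem_cons_self ..
            have hvlt : l[i] < l[i + l.count l[i]] := hgt _ hmem
            intro hmemtake
            -- every element of take (i+count) is ≤ l[i]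
            have hsplit : l.take (i + l.count l[i])
                = l.take i ++ List.replicate (l.count l[i]) l[i] := by
              rw [List.take_add]
              congr 1
              rw [hrun]
              exact List.take_left' (by simp)
            rw [hsplit, List.mem_append] at hmemtake
            rcases hmemtake with hmt | hmr
            · -- elements of take i are ≤ elements of drop i (which contains l[i] at its head)
              have hvd : l[i] ∈ l.drop i := by
                rw [List.drop_eq_getElem_cons h]
                exact List.mem_cons_self ..
              have := (List.pairwise_append.mp
                (by rw [List.take_append_drop]; exact hs)).2.2 _ hmt _ hvd
              exact absurd hvlt (by omega)
            · have := (List.eq_of_mem_replicate hmr)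
              omega
          · exact Or.inl (by omega)
        obtain ⟨r', hreq, ihp, ihm⟩ := ih (i + l.count l[i]) (by omega) hinv' (acc ++ [l[i]])
        refine ⟨l[i] :: r', ?_, ?_, ?_⟩
        · rw [hunf acc, hreq, List.append_assoc, List.singleton_append]
        · rw [List.pairwise_cons]
          exact ⟨fun w hw => hgt w ((ihm w).mp hw), ihp⟩
        · have hmemdrop : ∀ w, w ∈ l.drop i ↔ w = l[i] ∨ w ∈ l.drop (i + l.count l[i]) := by
            intro w
            rw [hrun, List.mem_append, List.mem_replicate]
            constructor
            · rintro (⟨-, rfl⟩ | hw); · exact Or.inl rfl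
              · exact Or.inr hw
            · rintro (rfl | hw); · exact Or.inl ⟨by omega, rfl⟩
              · exact Or.inr hw
          intro w
          rw [List.mem_cons, hmemdrop w, ihm w]
      · refine ⟨[], ?_, by simp, ?_⟩
        · rw [pvDedupLoop, dif_neg h]
          simp
        · have hdn : l.drop i = [] := List.drop_eq_nil_of_le (by omega)
          simp [hdn]

theorem delt_num_eq_alt (Pdelt : List Int) : delt_num Pdelt = delt_num_alt Pdelt := by
  unfold delt_num delt_num_alt
  set delt := (((PySem.List.pyRange 1 ((Pdelt.length : Int) + 1) 1).foldl
      (fun acc i => acc ++ [List.sublistsLen i.toNat Pdelt]) []).foldl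
        (fun d grp =>
          grp.foldl (fun d combo =>
            (combo.foldl (fun (st : Int × List Int) x => (st.1 * x, (st.1 * x) :: st.2))
              ((1 : Int), d)).2) d) []).reverse with hdelt
  set prods := Pdelt.foldl (fun s x =>
      PySem.Set.union (PySem.Set.union s (s.map (fun p => p * x))) [x]) PySem.Set.empty
    with hprods
  set ds := delt.mergeSort (fun a b => decide (a ≤ b)) with hds
  have hsorted : ds.Pairwise (· ≤ ·) :=
    List.pairwise_mergeSort' (r := ((· ≤ ·) : Int → Int → Prop)) delt
  obtain ⟨r, hreq, hLp, hLm⟩ := pvDedupLoopSpec ds hsorted ds.length 0 (by omega)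
    (by
      by_cases h0 : 0 < ds.length
      · exact Or.inr ⟨h0, by simp⟩
      · exact Or.inl (by omega)) []
  rw [List.nil_append] at hreq
  rw [hreq]
  -- same members
  have hmem : ∀ v, v ∈ r ↔ v ∈ prods := by
    intro v
    rw [hLm v, List.drop_zero, hds, (List.mergeSort_perm delt _).mem_iff, hdelt, pvMemA,
      hprods, pvMemBFold]
    constructor
    · rintro ⟨s, h1, h2, h3⟩
      exact Or.inr ⟨s, h1, h2, Or.inl h3⟩
    · rintro (h | ⟨s, h1, h2, h3 | ⟨p, hp, -⟩⟩)
      · exact absurd h (List.not_mem_nil)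
      · exact ⟨s, h1, h2, h3⟩
      · exact absurd hp (List.not_mem_nil)
  have hLnodup : r.Nodup := hLp.imp (fun h => ne_of_lt h)
  have hPnodup : prods.Nodup := pvNodupBFold Pdelt [] (List.nodup_nil)
  have hperm : r.Perm prods :=
    (List.perm_ext_iff_of_nodup hLnodup hPnodup).mpr hmem
  exact (PySem.List.sorted_eq_of_perm_of_pairwise_lt prods r (fun v => v) hperm hLp).symm

-- ===== VERDICT (by name: the statement is the Claim_ definition above) =====
theorem delt_num_spec : Claim_equal_delt_num := by
  intro Pdelt _
  unfold Spec_delt_num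
  exact delt_num_eq_alt Pdelt
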